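-- pv_equiv track=rewrite | github.com/abhinavjain241/vibecheck | main.py | find_most_common_event
-- ===== SOURCE A (Python) =====
-- def find_most_common_event(user_genres, event_genres):
--     most_common_event = None
--     max_common_genres = 0
--     for event, genres in event_genres.items():
--         common_genres = sum(
--             min(genres[genre], user_genres[genre])
--             for genre in genres.keys() & user_genres.keys()
--         )
--         if common_genres > max_common_genres:
--             max_common_genres = common_genres
--             most_common_event = event
--     return most_common_event, max_common_genres
-- ===== SOURCE B (Python) =====
-- def find_most_common_event(user_genres, event_genres):
--     # Inverted index: genre -> [(event, weight)], so scoring touches only the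
--     # events that actually contain each of the user's genres.
--     index = {}
--     for event, genres in event_genres.items():
--         for genre, w in genres.items():
--             index.setdefault(genre, []).append((event, w))
--     scores = dict.fromkeys(event_genres, 0)
--     for genre, uw in user_genres.items():
--         for event, w in index.get(genre, ()):
--             scores[event] += min(w, uw)
--     best_event, best_score = None, 0
--     for event, score in scores.items():
--         if score > best_score:
--             best_event, best_score = event, score
--     return best_event, best_score
-- ===== Notes on version B (the rewrite author's own statement) =====
-- stated objective: alternative
-- what changed: A is event-major: for each event it intersects the event's key set with the user's and sums mins while tracking a running maximum; B first builds an inverted index genre -> [(event, weight)], then accumulates per-event scores by walking only the user's genres through that index (no per-event key-set intersection), and a separate final pass picks the first best positive score.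
import Mathlib
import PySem

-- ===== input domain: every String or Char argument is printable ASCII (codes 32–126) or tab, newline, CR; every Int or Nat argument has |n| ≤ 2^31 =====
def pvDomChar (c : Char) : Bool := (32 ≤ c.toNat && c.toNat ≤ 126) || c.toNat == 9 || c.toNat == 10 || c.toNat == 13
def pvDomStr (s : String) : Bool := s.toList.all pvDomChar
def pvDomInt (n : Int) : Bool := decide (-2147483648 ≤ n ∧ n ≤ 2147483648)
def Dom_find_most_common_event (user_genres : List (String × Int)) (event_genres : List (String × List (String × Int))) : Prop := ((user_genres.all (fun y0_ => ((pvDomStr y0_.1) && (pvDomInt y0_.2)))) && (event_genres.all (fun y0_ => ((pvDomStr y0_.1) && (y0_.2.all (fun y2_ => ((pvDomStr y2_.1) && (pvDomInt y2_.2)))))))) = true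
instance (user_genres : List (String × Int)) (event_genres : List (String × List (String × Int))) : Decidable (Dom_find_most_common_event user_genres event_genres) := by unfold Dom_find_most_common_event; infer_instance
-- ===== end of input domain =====

-- B replaces A's event-major pass (key-set intersection per event + running maximum)
-- by an inverted genre -> (event, weight) index, per-event score accumulation driven
-- only by the user's genres, and a separate selection pass (objective: alternative).

-- ===== PORT A =====
-- per event: sum(min(genres[g], user_genres[g]) for g in genres.keys() & user_genres.keys())
-- (a sum over a Python set: order-independent, so consuming the Set's list is exact)
def find_most_common_event (user_genres : List (String × Int)) (event_genres : List (String × List (String × Int))) : Option String × Int :=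
  ((PySem.Dict.ofList event_genres).items).foldl
    (fun acc p =>
      if ((PySem.Set.inter (PySem.Dict.ofList p.2).keys (PySem.Dict.ofList user_genres).keys).map
            (fun g => min ((PySem.Dict.ofList p.2).getD g 0) ((PySem.Dict.ofList user_genres).getD g 0))).sum > acc.2
      then ((some p.1 : Option String),
            ((PySem.Set.inter (PySem.Dict.ofList p.2).keys (PySem.Dict.ofList user_genres).keys).map
              (fun g => min ((PySem.Dict.ofList p.2).getD g 0) ((PySem.Dict.ofList user_genres).getD g 0))).sum)
      else acc)
    ((none : Option String), (0 : Int))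

-- ===== PORT B =====
-- index = {}; for event, genres in event_genres.items(): for genre, w in genres.items():
--   index.setdefault(genre, []).append((event, w))      (= modify genre [] (· ++ [(event, w)]))
def pvIndexB (event_genres : List (String × List (String × Int))) : PySem.Dict String (List (String × Int)) :=
  ((PySem.Dict.ofList event_genres).items).foldl
    (fun d p => ((PySem.Dict.ofList p.2).items).foldl
      (fun d q => d.modify q.1 [] (· ++ [(p.1, q.2)])) d)
    PySem.Dict.empty

-- scores = dict.fromkeys(event_genres, 0); for genre, uw in user_genres.items():
--   for event, w in index.get(genre, ()): scores[event] += min(w, uw)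
def pvScoresB (user_genres : List (String × Int)) (event_genres : List (String × List (String × Int))) : PySem.Dict String Int :=
  ((PySem.Dict.ofList user_genres).items).foldl
    (fun s gp => ((pvIndexB event_genres).getD gp.1 []).foldl
      (fun s ew => s.modify ew.1 0 (· + min ew.2 gp.2)) s)
    (((PySem.Dict.ofList event_genres).items).foldl (fun d p => d.insert p.1 0) PySem.Dict.empty)

-- final scan keeps the first strictly-better score
def find_most_common_event_alt (user_genres : List (String × Int)) (event_genres : List (String × List (String × Int))) : Option String × Int :=
  ((pvScoresB user_genres event_genres).items).foldl
    (fun acc q => if q.2 > acc.2 then ((some q.1 : Option String), q.2) else acc)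
    ((none : Option String), (0 : Int))

-- ===== PRECONDITION & SPEC =====
def Spec_find_most_common_event (user_genres : List (String × Int)) (event_genres : List (String × List (String × Int))) (out : Option String × Int) : Prop := out = find_most_common_event_alt user_genres event_genres
instance (user_genres : List (String × Int)) (event_genres : List (String × List (String × Int))) (out : Option String × Int) : Decidable (Spec_find_most_common_event user_genres event_genres out) := by unfold Spec_find_most_common_event; infer_instance

-- ===== CLAIM (what is proved, stated in full; the proofs are below) =====
def Claim_equal_find_most_common_event : Prop := ∀ (user_genres : List (String × Int)) (event_genres : List (String × List (String × Int))), Dom_find_most_common_event user_genres event_genres → Spec_find_most_common_event user_genres event_genres (find_most_common_event user_genres event_genres)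

-- ===== LEMMAS AND PROOFS =====

-- A's per-event contribution of one user item gp to an event with genre dict gd
def pvContrib (gd : PySem.Dict String Int) (gp : String × Int) : Int :=
  if gd.contains gp.1 then min (gd.getD gp.1 0) gp.2 else 0

-- the index-build pairs, flattened: (genre, (event, weight)) in build order
def pvFlat (event_genres : List (String × List (String × Int))) : List (String × (String × Int)) :=
  ((PySem.Dict.ofList event_genres).items).flatMap
    (fun p => ((PySem.Dict.ofList p.2).items).map (fun q => (q.1, (p.1, q.2))))

-- the score-update pairs, flattened: (event, addend) in update order
def pvFlat2 (user_genres : List (String × Int)) (event_genres : List (String × List (String × Int))) : List (String × Int) :=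
  ((PySem.Dict.ofList user_genres).items).flatMap
    (fun gp => ((pvIndexB event_genres).getD gp.1 []).map (fun ew => (ew.1, min ew.2 gp.2)))

-- a nested foldl is the foldl over the flattened pair list
theorem pv_foldl_nested {α β γ δ : Type} (l : List α) (g : α → List β) (h : α → β → γ)
    (step : δ → γ → δ) (d : δ) :
    l.foldl (fun d p => (g p).foldl (fun d q => step d (h p q)) d) d
      = (l.flatMap (fun p => (g p).map (h p))).foldl step d := by
  induction l generalizing d with
  | nil => rfl
  | cons x xs ih => simp [List.foldl_append, List.foldl_map, ih]

theorem pv_index_eq (event_genres : List (String × List (String × Int))) :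
    pvIndexB event_genres
      = (pvFlat event_genres).foldl (fun d r => d.modify r.1 [] (· ++ [r.2])) PySem.Dict.empty := by
  unfold pvIndexB pvFlat
  exact pv_foldl_nested ((PySem.Dict.ofList event_genres).items)
    (fun p => (PySem.Dict.ofList p.2).items) (fun p q => (q.1, (p.1, q.2)))
    (fun d r => d.modify r.1 [] (· ++ [r.2])) PySem.Dict.empty

theorem pv_index_getD (event_genres : List (String × List (String × Int))) (g : String) :
    (pvIndexB event_genres).getD g []
      = ((pvFlat event_genres).filter (fun r => r.1 == g)).map (·.2) := by
  rw [pv_index_eq, PySem.Dict.getD_foldl_modify_append]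
  rw [PySem.Dict.getD_empty, List.nil_append]

theorem pv_mem_flat (event_genres : List (String × List (String × Int))) (r : String × (String × Int))
    (hr : r ∈ pvFlat event_genres) : r.2.1 ∈ (PySem.Dict.ofList event_genres).keys := by
  unfold pvFlat at hr
  obtain ⟨p, hp, hr⟩ := List.mem_flatMap.mp hr
  obtain ⟨q, _, rfl⟩ := List.mem_map.mp hr
  exact List.mem_map.mpr ⟨p, hp, rfl⟩

-- a key-nodup pair list filtered on one key keeps exactly the pair at that key
theorem pv_filter_single {ν : Type} (l : List (String × ν)) (g : String) (v : ν)
    (hnd : (l.map (·.1)).Nodup) (hm : (g, v) ∈ l) :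
    l.filter (fun q => q.1 == g) = [(g, v)] := by
  induction l with
  | nil => cases hm
  | cons x xs ih =>
    rw [List.map_cons, List.nodup_cons] at hnd
    rcases List.mem_cons.mp hm with h | h
    · subst h
      rw [List.filter_cons_of_pos (by simp)]
      have : xs.filter (fun q => q.1 == g) = [] := by
        apply List.filter_eq_nil_iff.mpr
        intro q hq hqg
        exact hnd.1 (List.mem_map.mpr ⟨q, hq, by simpa using hqg⟩)
      rw [this]
    · have hx : ¬ ((x.1 == g) = true) := by
        intro hxg
        exact hnd.1 (List.mem_map.mpr ⟨(g, v), h, (eq_of_beq hxg).symm⟩)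
      rw [List.filter_cons, if_neg hx]
      exact ih hnd.2 h

theorem pv_items_filter (gs : List (String × Int)) (g : String) :
    (PySem.Dict.ofList gs).items.filter (fun q => q.1 == g)
      = if (PySem.Dict.ofList gs).contains g
        then [(g, (PySem.Dict.ofList gs).getD g 0)] else [] := by
  set gd := PySem.Dict.ofList gs with hgd
  have hnd : gd.keys.Nodup := PySem.Dict.nodup_keys_ofList gs
  cases hg : gd.get? g with
  | none =>
    have hc : gd.contains g = false := by
      rw [PySem.Dict.contains_eq_isSome_get?, hg]; rfl
    rw [hc, if_neg (by simp)]
    apply List.filter_eq_nil_iff.mpr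
    intro q hq hqg
    exact (PySem.Dict.get?_eq_none_iff_not_mem_keys gd g).mp hg
      (by rw [← eq_of_beq hqg]; exact PySem.Dict.mem_keys_of_mem_items gd hq)
  | some v =>
    have hc : gd.contains g = true := by
      rw [PySem.Dict.contains_eq_isSome_get?, hg]; rfl
    have hGD : gd.getD g 0 = v := by
      rw [PySem.Dict.getD_eq_get?_getD, hg]; rfl
    rw [hc, if_pos rfl, hGD]
    exact pv_filter_single gd.items g v hnd (PySem.Dict.mem_items_of_get?_eq_some gd hg)

-- items of the accumulation loop: every key stays in place, its value gains the filtered sum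
theorem pv_items_foldl_modify_add (l : List (String × Int)) (s : PySem.Dict String Int)
    (hnd : s.keys.Nodup) (hl : ∀ r ∈ l, r.1 ∈ s.keys) :
    (l.foldl (fun s r => s.modify r.1 0 (· + r.2)) s).items
      = s.items.map (fun q => (q.1, q.2 + ((l.filter (fun r => r.1 == q.1)).map (·.2)).sum)) := by
  induction l generalizing s with
  | nil => simp
  | cons r l ih =>
    have hrc : s.contains r.1 = true :=
      (PySem.Dict.contains_iff_mem_keys s r.1).mpr (hl r (List.mem_cons_self))
    have hmod : s.modify r.1 0 (· + r.2) = s.insert r.1 (s.getD r.1 0 + r.2) := rfl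
    have hitems : (s.modify r.1 0 (· + r.2)).items
        = s.items.map (fun q => if q.1 == r.1 then (q.1, q.2 + r.2) else q) := by
      rw [hmod, PySem.Dict.items_insert_of_contains s _ hrc]
      apply List.map_congr_left
      rintro ⟨qk, qv⟩ hq
      by_cases hqr : qk = r.1
      · have : s.getD r.1 0 = qv := by
          rw [← hqr]
          exact PySem.Dict.getD_of_mem_items s hq hnd 0
        simp [hqr, this]
      · simp [hqr]
    have hkeys : (s.modify r.1 0 (· + r.2)).keys = s.keys := by
      rw [hmod]
      exact PySem.Dict.keys_insert_of_contains s _ hrc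
    rw [List.foldl_cons, ih _ (by rw [hkeys]; exact hnd)
        (by rw [hkeys]; exact fun x hx => hl x (List.mem_cons_of_mem r hx)),
      hitems, List.map_map]
    apply List.map_congr_left
    rintro ⟨qk, qv⟩ _
    simp only [Function.comp]
    by_cases hqr : qk = r.1
    · rw [List.filter_cons_of_pos (by simp [hqr])]
      simp [hqr, add_assoc]
    · have hne : (r.1 == qk) = false := by
        simp only [beq_eq_false_iff_ne, ne_eq]
        exact fun h => hqr h.symm
      rw [List.filter_cons_of_neg (by simp [hne])]
      simp [hqr]

theorem pv_sum_flatMap {α : Type} (l : List α) (f : α → List Int) :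
    (l.flatMap f).sum = (l.map (fun x => (f x).sum)).sum := by
  induction l with
  | nil => rfl
  | cons x xs ih => simp [ih]

-- restricting the flattened index pairs to one event of the dict picks out that event's own pairs
theorem pv_event_restrict (event_genres : List (String × List (String × Int)))
    (p : String × List (String × Int)) (hp : p ∈ (PySem.Dict.ofList event_genres).items) (g : String) :
    (pvFlat event_genres).filter (fun r => r.2.1 == p.1 && r.1 == g)
      = ((PySem.Dict.ofList p.2).items.filter (fun q => q.1 == g)).map (fun q => (q.1, (p.1, q.2))) := by
  have hnd : ((PySem.Dict.ofList event_genres).items.map (·.1)).Nodup :=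
    PySem.Dict.nodup_keys_ofList event_genres
  obtain ⟨l1, l2, hE⟩ := List.append_of_mem hp
  have hnotin : ∀ p' ∈ l1 ++ l2, p'.1 ≠ p.1 := by
    have hnd' := hnd
    rw [hE, List.map_append, List.map_cons, List.nodup_append] at hnd'
    obtain ⟨h1n, h2n, hdisj⟩ := hnd'
    intro p' hp' h
    rcases List.mem_append.mp hp' with hm | hm
    · exact hdisj p'.1 (List.mem_map.mpr ⟨p', hm, rfl⟩) p.1 List.mem_cons_self h
    · exact (List.nodup_cons.mp h2n).1 (List.mem_map.mpr ⟨p', hm, h⟩)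
  unfold pvFlat
  rw [hE, List.flatMap_append, List.flatMap_cons, List.filter_append, List.filter_append]
  have hnil : ∀ p' ∈ l1 ++ l2,
      (((PySem.Dict.ofList p'.2).items).map (fun q => (q.1, (p'.1, q.2)))).filter
        (fun r => r.2.1 == p.1 && r.1 == g) = [] := by
    intro p' hp'
    apply List.filter_eq_nil_iff.mpr
    intro r hr hpred
    obtain ⟨q, _, rfl⟩ := List.mem_map.mp hr
    simp only [Bool.and_eq_true, beq_iff_eq] at hpred
    exact hnotin p' hp' hpred.1
  have h1 : (l1.flatMap (fun p' => ((PySem.Dict.ofList p'.2).items).map (fun q => (q.1, (p'.1, q.2))))).filter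
      (fun r => r.2.1 == p.1 && r.1 == g) = [] := by
    rw [List.filter_flatMap]
    apply List.flatMap_eq_nil_iff.mpr
    intro p' hp'
    exact hnil p' (List.mem_append.mpr (Or.inl hp'))
  have h2 : (l2.flatMap (fun p' => ((PySem.Dict.ofList p'.2).items).map (fun q => (q.1, (p'.1, q.2))))).filter
      (fun r => r.2.1 == p.1 && r.1 == g) = [] := by
    rw [List.filter_flatMap]
    apply List.flatMap_eq_nil_iff.mpr
    intro p' hp'
    exact hnil p' (List.mem_append.mpr (Or.inr hp'))
  rw [h1, h2, List.append_nil, List.nil_append, List.filter_map]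
  congr 1
  apply List.filter_congr
  intro q _
  simp [Function.comp]

-- per event, B's accumulated addends sum to A's per-event contribution sum
theorem pv_T (user_genres : List (String × Int)) (event_genres : List (String × List (String × Int)))
    (p : String × List (String × Int)) (hp : p ∈ (PySem.Dict.ofList event_genres).items) :
    (((pvFlat2 user_genres event_genres).filter (fun r => r.1 == p.1)).map (·.2)).sum
      = ((PySem.Dict.ofList user_genres).items.map (pvContrib (PySem.Dict.ofList p.2))).sum := by
  unfold pvFlat2
  rw [List.filter_flatMap, List.map_flatMap, pv_sum_flatMap]
  congr 1
  apply List.map_congr_left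
  intro gp _
  simp only [Function.comp, pv_index_getD, List.map_map, List.filter_map, List.filter_filter]
  show (((pvFlat event_genres).filter (fun r => r.2.1 == p.1 && r.1 == gp.1)).map
      (fun r => min r.2.2 gp.2)).sum = pvContrib (PySem.Dict.ofList p.2) gp
  rw [pv_event_restrict event_genres p hp gp.1, List.map_map, pv_items_filter]
  unfold pvContrib
  by_cases hc : (PySem.Dict.ofList p.2).contains gp.1
  · simp [hc]
  · simp [hc]

-- a sum of ite-zero terms is the sum over the filtered list
theorem pv_sum_ite {α : Type} (l : List α) (p : α → Bool) (f : α → Int) :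
    (l.map (fun x => if p x then f x else 0)).sum = ((l.filter p).map f).sum := by
  induction l with
  | nil => rfl
  | cons x xs ih =>
    by_cases h : p x <;> simp [h, ih]

-- B's per-event contribution sum equals A's intersection sum
theorem pv_score_eq (ug gs : List (String × Int)) :
    ((PySem.Dict.ofList ug).items.map (pvContrib (PySem.Dict.ofList gs))).sum
      = ((PySem.Set.inter (PySem.Dict.ofList gs).keys (PySem.Dict.ofList ug).keys).map
          (fun g => min ((PySem.Dict.ofList gs).getD g 0) ((PySem.Dict.ofList ug).getD g 0))).sum := by
  set ud := PySem.Dict.ofList ug with hud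
  set gd := PySem.Dict.ofList gs with hgd
  have hnd : ud.keys.Nodup := PySem.Dict.nodup_keys_ofList ug
  have hgnd : gd.keys.Nodup := PySem.Dict.nodup_keys_ofList gs
  have h1 : (ud.items.map (pvContrib gd)).sum
      = ((ud.items.filter (fun p => gd.contains p.1)).map
          (fun p => min (gd.getD p.1 0) (ud.getD p.1 0))).sum := by
    unfold pvContrib
    rw [pv_sum_ite ud.items (fun p => gd.contains p.1)
        (fun p => min (gd.getD p.1 0) p.2)]
    congr 1
    apply List.map_congr_left
    intro p hp
    have hpmem : p ∈ ud.items := List.mem_of_mem_filter hp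
    have : ud.getD p.1 0 = p.2 := by
      obtain ⟨k, v⟩ := p
      exact PySem.Dict.getD_of_mem_items ud hpmem hnd 0
    rw [this]
  rw [h1]
  have h2 : (ud.items.filter (fun p => gd.contains p.1)).map
        (fun p => min (gd.getD p.1 0) (ud.getD p.1 0))
      = ((ud.items.filter (fun p => gd.contains p.1)).map (·.1)).map
        (fun g => min (gd.getD g 0) (ud.getD g 0)) := by
    rw [List.map_map]; rfl
  rw [h2]
  apply List.Perm.sum_eq
  apply List.Perm.map
  have hL : ((ud.items.filter (fun p => gd.contains p.1)).map (·.1))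
      = ud.keys.filter (fun g => gd.contains g) := by
    show _ = (ud.items.map (·.1)).filter (fun g => gd.contains g)
    rw [List.filter_map]
    rfl
  rw [hL]
  apply (List.perm_ext_iff_of_nodup (hnd.filter _)
    (PySem.Set.nodup_inter _ _ hgnd)).mpr
  intro x
  rw [List.mem_filter, PySem.Set.mem_inter]
  constructor
  · rintro ⟨hx, hc⟩
    exact ⟨(PySem.Dict.contains_iff_mem_keys _ _).mp hc, hx⟩
  · rintro ⟨hg, hx⟩
    exact ⟨hx, (PySem.Dict.contains_iff_mem_keys _ _).mpr hg⟩

-- B's final score table lists every event, in order, with A's per-event score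
theorem pv_scores_items (ug : List (String × Int)) (eg : List (String × List (String × Int))) :
    (pvScoresB ug eg).items
      = ((PySem.Dict.ofList eg).items).map
          (fun p => (p.1, ((PySem.Dict.ofList ug).items.map (pvContrib (PySem.Dict.ofList p.2))).sum)) := by
  have hnd : ((PySem.Dict.ofList eg).items.map (fun x => x.1)).Nodup :=
    PySem.Dict.nodup_keys_ofList eg
  have hs0 : (((PySem.Dict.ofList eg).items).foldl (fun d p => d.insert p.1 0) (PySem.Dict.empty : PySem.Dict String Int)).items
      = ((PySem.Dict.ofList eg).items).map (fun p => (p.1, (0 : Int))) :=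
    PySem.Dict.items_foldl_insert_fresh ((PySem.Dict.ofList eg).items)
      (fun p => p.1) (fun _ => (0:Int)) PySem.Dict.empty
      (fun a _ => @PySem.Dict.contains_empty String Int _ a.1) hnd
  have hmm : List.map (fun (x : String × Int) => x.1)
        ((((PySem.Dict.ofList eg).items).foldl (fun d p => d.insert p.1 0) (PySem.Dict.empty : PySem.Dict String Int)).items)
      = ((PySem.Dict.ofList eg).items).map (fun x => x.1) := by
    rw [hs0, List.map_map]
    rfl
  have hs0k : (((PySem.Dict.ofList eg).items).foldl (fun d p => d.insert p.1 0) (PySem.Dict.empty : PySem.Dict String Int)).keys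
      = ((PySem.Dict.ofList eg).items).map (fun x => x.1) := hmm
  unfold pvScoresB
  have hflat : (((PySem.Dict.ofList ug).items).foldl
      (fun s gp => ((pvIndexB eg).getD gp.1 []).foldl
        (fun s ew => s.modify ew.1 0 (· + min ew.2 gp.2)) s)
      (((PySem.Dict.ofList eg).items).foldl (fun d p => d.insert p.1 0) (PySem.Dict.empty : PySem.Dict String Int)))
      = (pvFlat2 ug eg).foldl (fun s r => s.modify r.1 0 (· + r.2))
          (((PySem.Dict.ofList eg).items).foldl (fun d p => d.insert p.1 0) (PySem.Dict.empty : PySem.Dict String Int)) :=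
    pv_foldl_nested ((PySem.Dict.ofList ug).items)
      (fun gp => (pvIndexB eg).getD gp.1 []) (fun gp ew => (ew.1, min ew.2 gp.2))
      (fun s r => s.modify r.1 0 (· + r.2))
      (((PySem.Dict.ofList eg).items).foldl (fun d p => d.insert p.1 0) (PySem.Dict.empty : PySem.Dict String Int))
  rw [hflat]
  rw [pv_items_foldl_modify_add _ _ (by rw [hs0k]; exact hnd)
      (by
        intro r hr
        rw [hs0k]
        unfold pvFlat2 at hr
        obtain ⟨gp, _, hr2⟩ := List.mem_flatMap.mp hr
        obtain ⟨ew, hew, rfl⟩ := List.mem_map.mp hr2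
        rw [pv_index_getD] at hew
        obtain ⟨r', hr', rfl⟩ := List.mem_map.mp hew
        exact pv_mem_flat eg r' (List.mem_of_mem_filter hr'))]
  rw [hs0, List.map_map]
  apply List.map_congr_left
  intro p hp
  show (p.1, 0 + (((pvFlat2 ug eg).filter (fun r => r.1 == p.1)).map (·.2)).sum)
      = (p.1, ((PySem.Dict.ofList ug).items.map (pvContrib (PySem.Dict.ofList p.2))).sum)
  rw [zero_add, pv_T ug eg p hp]

-- ===== VERDICT (by name: the statement is the Claim_ definition above) =====
theorem find_most_common_event_spec : Claim_equal_find_most_common_event := by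
  intro ug eg _
  show find_most_common_event ug eg = find_most_common_event_alt ug eg
  unfold find_most_common_event find_most_common_event_alt
  rw [pv_scores_items, List.foldl_map]
  apply PySem.List.foldl_congr_mem
  intro acc p _
  rw [pv_score_eq ug p.2]
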